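-- pv_equiv track=rewrite | github.com/paiml/depyler | examples/hard_final_db_queryplan.py | sort_cost
-- ===== SOURCE A (Python) =====
-- def sort_cost(n: int) -> int:
--     """Approximate sort cost: n * log2(n)."""
--     if n <= 1:
--         return 0
--     log2: int = 0
--     temp: int = n
--     while temp > 1:
--         temp = temp // 2
--         log2 = log2 + 1
--     return n * log2
-- ===== SOURCE B (Python) =====
-- def sort_cost(n: int) -> int:
--     """Approximate sort cost: n * log2(n)."""
--     if n <= 1:
--         return 0
--     return n * (n.bit_length() - 1)
-- ===== Notes on version B (the rewrite author's own statement) =====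
-- stated objective: idiomatic
-- what changed: Replaces the halving loop that counts floor(log2(n)) with the closed-form bit-length expression n * (n.bit_length() - 1), keeping the guard for non-positive and unit inputs.
import Mathlib
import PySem

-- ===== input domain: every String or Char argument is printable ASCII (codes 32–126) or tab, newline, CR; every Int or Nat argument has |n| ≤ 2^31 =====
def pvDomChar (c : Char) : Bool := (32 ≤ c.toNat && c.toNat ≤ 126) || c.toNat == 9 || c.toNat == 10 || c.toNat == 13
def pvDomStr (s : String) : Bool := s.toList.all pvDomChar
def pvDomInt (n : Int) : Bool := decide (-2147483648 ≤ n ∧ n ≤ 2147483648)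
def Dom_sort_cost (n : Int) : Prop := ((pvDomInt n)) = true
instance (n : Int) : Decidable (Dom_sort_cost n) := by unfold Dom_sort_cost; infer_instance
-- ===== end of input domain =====

-- B replaces A's halving loop with the closed-form bit-length expression (O(1) instead of O(log n)).

-- ===== PORT A =====
-- the while loop of A: while temp > 1: temp //= 2; log2 += 1
def sortCostLoop (temp : Int) (log2 : Int) : Int :=
  if h : temp > 1 then
    sortCostLoop (PySem.Int.floordiv temp 2) (log2 + 1)
  else
    log2
termination_by temp.toNat
decreasing_by
  have h2 : PySem.Int.floordiv temp 2 = temp / 2 :=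
    PySem.Int.floordiv_eq_ediv_of_pos (by omega)
  rw [h2]
  omega

def sort_cost (n : Int) : Int :=
  if n ≤ 1 then 0
  else n * sortCostLoop n 0

-- ===== PORT B =====
def sort_cost_alt (n : Int) : Int :=
  if n ≤ 1 then 0
  else n * ((PySem.Int.bitLength n : Int) - 1)

-- ===== PRECONDITION & SPEC =====
def Spec_sort_cost (n : Int) (out : Int) : Prop := out = sort_cost_alt n
instance (n : Int) (out : Int) : Decidable (Spec_sort_cost n out) := by unfold Spec_sort_cost; infer_instance

-- ===== CLAIM (what is proved, stated in full; the proofs are below) =====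
def Claim_equal_sort_cost : Prop := ∀ (n : Int), Dom_sort_cost n → Spec_sort_cost n (sort_cost n)

-- ===== LEMMAS AND PROOFS =====

-- loop invariant: the accumulator version computes acc + (bitLength temp - 1) for temp ≥ 1
theorem sortCostLoop_eq (temp : Int) (acc : Int) (h1 : 1 ≤ temp) :
    sortCostLoop temp acc = acc + ((PySem.Int.bitLength temp : Int) - 1) := by
  induction temp, acc using sortCostLoop.induct with
  | case1 temp acc h ih =>
    rw [sortCostLoop, dif_pos h, ih (by
      have := PySem.Int.le_floordiv_iff_mul_le (a := temp) (b := 2) (q := 1) (by omega)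
      omega)]
    rw [PySem.Int.bitLength_of_pos (n := temp) (by omega)]
    have hpos : 1 ≤ (PySem.Int.bitLength (PySem.Int.floordiv temp 2) : Int) := by
      have hfd : 1 ≤ PySem.Int.floordiv temp 2 := by
        have := PySem.Int.le_floordiv_iff_mul_le (a := temp) (b := 2) (q := 1) (by omega)
        omega
      have hlt := PySem.Int.lt_two_pow_bitLength (PySem.Int.floordiv temp 2)
      have hna : 1 ≤ (PySem.Int.floordiv temp 2).natAbs := by omega
      have hbn : 1 ≤ PySem.Int.bitLength (PySem.Int.floordiv temp 2) := by
        by_contra hc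
        have h0 : PySem.Int.bitLength (PySem.Int.floordiv temp 2) = 0 := by omega
        rw [h0] at hlt
        simp at hlt
        omega
      exact_mod_cast hbn
    push_cast
    omega
  | case2 temp acc h =>
    rw [sortCostLoop, dif_neg h]
    have ht : temp = 1 := by omega
    subst ht
    norm_num [show PySem.Int.bitLength 1 = 1 from by decide]

-- ===== VERDICT (by name: the statement is the Claim_ definition above) =====
theorem sort_cost_spec : Claim_equal_sort_cost := by
  intro n _
  unfold Spec_sort_cost sort_cost sort_cost_alt
  by_cases h : n ≤ 1
  · simp [h]
  · rw [if_neg h, if_neg h, sortCostLoop_eq n 0 (by omega)]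
    ring
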